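-- pv_equiv track=rewrite | github.com/Kabir1240/Python | NaiveZAlgo.py | ZAlgo
-- ===== SOURCE A (Python) =====
-- def ZAlgo(string):
--     z_vals = [None] * len(string)
--     z_box = []
--     l_vals = []
--     r_vals = []
--     l = 0
--     r = 0
--     for pos in range(1, len(string)):
--         k = pos
--         if string[k] == string[0]:
--             k += 1
--             l = pos
--             while k < len(string) and string[k] == string[k - pos]:
--                 k += 1
--             r = k - 1
--             z_box += [(l + 1, r + 1)]
--
--        # Update li values
--         if l == 0:
--             continue
--         elif (len(l_vals) == 0 or l + 1 <= l_vals[-1] or l + 1 >= r_vals[-1]):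
--             l_vals.append(l + 1)
--         else:
--             l_vals.append(l_vals[-1])
--
--         # update ri values
--         if r == 0:
--             continue
--         elif len(r_vals) == 0 or r + 1 >= r_vals[-1]:
--             r_vals.append(r + 1)
--         else:
--             r_vals.append(r_vals[-1])
--
--         # update zi values
--         z_vals[pos] = k - pos
--
--     return (z_vals, z_box, l_vals, r_vals)
-- ===== SOURCE B (Python) =====
-- def _zarray(string):
--     # linear-time Z-values (reuse of the current [l, r) match window)
--     n = len(string)
--     z = [0] * n
--     l = r = 0
--     for i in range(1, n):
--         zi = min(r - i, z[i - l]) if i < r else 0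
--         while i + zi < n and string[zi] == string[i + zi]:
--             zi += 1
--         z[i] = zi
--         if i + zi > r:
--             l, r = i, i + zi
--     return z
--
--
-- def ZAlgo(string):
--     n = len(string)
--     z = _zarray(string)
--     matches = [(p, p + z[p] - 1) for p in range(1, n) if z[p]]
--     z_box = [(l + 1, r + 1) for (l, r) in matches]
--     if not matches:
--         return ([None] * n, z_box, [], [])
--     p0 = matches[0][0]
--     z_vals = [None if p < p0 else z[p] for p in range(n)]
--     # l_vals / r_vals by walking the match list with a pointer
--     l_vals = []
--     r_vals = []
--     mi = 0
--     v = rm = 0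
--     for pos in range(p0, n):
--         if mi < len(matches) and matches[mi][0] == pos:
--             l, r = matches[mi]
--             mi += 1
--             if not l_vals or l + 1 >= rm:
--                 v = l + 1
--             rm = max(rm, r + 1)
--         l_vals.append(v)
--         r_vals.append(rm)
--     return (z_vals, z_box, l_vals, r_vals)
-- ===== Notes on version B (the rewrite author's own statement) =====
-- stated objective: faster
-- what changed: A recomputes each z-value by a fresh naive rescan and interleaves all bookkeeping in that one loop; B computes the z array with the linear Z-algorithm, materialises the list of matches once, builds z_box and z_vals directly from it by comprehensions, and derives l_vals/r_vals in a separate pass that walks the match list with a pointer and a running maximum.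
import Mathlib
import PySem

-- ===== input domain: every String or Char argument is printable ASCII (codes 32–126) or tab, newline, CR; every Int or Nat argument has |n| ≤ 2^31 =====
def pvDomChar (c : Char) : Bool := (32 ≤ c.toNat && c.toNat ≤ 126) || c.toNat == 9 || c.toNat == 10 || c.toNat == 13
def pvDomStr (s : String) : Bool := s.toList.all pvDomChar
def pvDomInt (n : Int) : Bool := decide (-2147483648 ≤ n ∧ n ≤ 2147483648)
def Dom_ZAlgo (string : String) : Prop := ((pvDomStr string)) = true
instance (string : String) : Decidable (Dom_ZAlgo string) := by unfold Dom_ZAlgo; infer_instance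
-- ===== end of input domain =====

-- B replaces A's quadratic per-position rescan-with-interleaved-bookkeeping by: the linear Z-algorithm
-- for the z array, an explicit list of matches built once, z_box/z_vals read off that list directly,
-- and l_vals/r_vals produced by a separate pass walking the match list with a pointer and a running max.

-- ===== PORT A =====
-- state of A's single loop: z_vals, z_box, l_vals, r_vals and the current l, r
structure PvSt where
  zv : List (Option Int)
  zb : List (Int × Int)
  lv : List Int
  rv : List Int
  l : Nat
  r : Nat
deriving Repr, DecidableEq

-- inner `while k < len(string) and string[k] == string[k-pos]: k += 1`
def pvWhileA (cs : List Char) (pos k : Nat) : Nat :=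
  if h : k < cs.length ∧ cs.getD k ' ' = cs.getD (k - pos) ' ' then
    pvWhileA cs pos (k + 1)
  else k
termination_by cs.length - k
decreasing_by omega

-- one iteration of A's `for pos in range(1, len(string))` loop
def pvStepA (cs : List Char) (st : PvSt) (pos : Nat) : PvSt :=
  let kst : Nat × PvSt :=
    if cs.getD pos ' ' = cs.getD 0 ' ' then
      let k := pvWhileA cs pos (pos + 1)
      (k, { st with l := pos, r := k - 1,
                    zb := st.zb ++ [((pos : Int) + 1, ((k - 1 : Nat) : Int) + 1)] })
    else (pos, st)
  let k := kst.1
  let st := kst.2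
  if st.l = 0 then st
  else
    let st := { st with lv := st.lv ++
      [if st.lv = [] ∨ (st.l : Int) + 1 ≤ st.lv.getLastD 0 ∨ (st.l : Int) + 1 ≥ st.rv.getLastD 0
       then (st.l : Int) + 1 else st.lv.getLastD 0] }
    if st.r = 0 then st
    else
      let st := { st with rv := st.rv ++
        [if st.rv = [] ∨ (st.r : Int) + 1 ≥ st.rv.getLastD 0
         then (st.r : Int) + 1 else st.rv.getLastD 0] }
      { st with zv := st.zv.set pos (some ((k - pos : Nat) : Int)) }

def pvInit (n : Nat) : PvSt := ⟨List.replicate n none, [], [], [], 0, 0⟩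

def ZAlgo (string : String) : List (Option Int) × (List (Int × Int)) × List Int × List Int :=
  let cs := string.toList
  let n := cs.length
  let st := (List.range' 1 (n - 1) 1).foldl (pvStepA cs) (pvInit n)
  (st.zv, st.zb, st.lv, st.rv)

-- ===== PORT B =====
-- `while i + zi < n and string[zi] == string[i + zi]: zi += 1`
def pvExtend (cs : List Char) (i zi : Nat) : Nat :=
  if h : i + zi < cs.length ∧ cs.getD zi ' ' = cs.getD (i + zi) ' ' then
    pvExtend cs i (zi + 1)
  else zi
termination_by cs.length - (i + zi)
decreasing_by omega

-- one iteration of _zarray's loop (linear Z-values with the l/r window)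
def pvZStep (cs : List Char) (s : List Nat × Nat × Nat) (i : Nat) : List Nat × Nat × Nat :=
  let z := s.1
  let l := s.2.1
  let r := s.2.2
  let zi0 := if i < r then min (r - i) (z.getD (i - l) 0) else 0
  let zi := pvExtend cs i zi0
  let z := z.set i zi
  if r < i + zi then (z, i, i + zi) else (z, l, r)

-- helper `_zarray(string)`
def pvZ (cs : List Char) : List Nat :=
  ((List.range' 1 (cs.length - 1) 1).foldl (pvZStep cs) (List.replicate cs.length 0, 0, 0)).1

-- `matches = [(p, p + z[p] - 1) for p in range(1, n) if z[p]]`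
def pvMatches (z : List Nat) (n : Nat) : List (Nat × Nat) :=
  (List.range' 1 (n - 1) 1).filterMap
    (fun p => if z.getD p 0 ≠ 0 then some (p, p + z.getD p 0 - 1) else none)

-- one iteration of B's l_vals/r_vals loop; state = (mi, v, rm, l_vals, r_vals)
def pvStepB (ms : List (Nat × Nat)) (s : Nat × Int × Int × List Int × List Int) (pos : Nat) :
    Nat × Int × Int × List Int × List Int :=
  if s.1 < ms.length ∧ (ms.getD s.1 (0, 0)).1 = pos then
    (s.1 + 1,
     (if s.2.2.2.1 = [] ∨ ((ms.getD s.1 (0, 0)).1 : Int) + 1 ≥ s.2.2.1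
      then ((ms.getD s.1 (0, 0)).1 : Int) + 1 else s.2.1),
     max s.2.2.1 (((ms.getD s.1 (0, 0)).2 : Int) + 1),
     s.2.2.2.1 ++ [if s.2.2.2.1 = [] ∨ ((ms.getD s.1 (0, 0)).1 : Int) + 1 ≥ s.2.2.1
                   then ((ms.getD s.1 (0, 0)).1 : Int) + 1 else s.2.1],
     s.2.2.2.2 ++ [max s.2.2.1 (((ms.getD s.1 (0, 0)).2 : Int) + 1)])
  else
    (s.1, s.2.1, s.2.2.1, s.2.2.2.1 ++ [s.2.1], s.2.2.2.2 ++ [s.2.2.1])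

def ZAlgo_alt (string : String) : List (Option Int) × (List (Int × Int)) × List Int × List Int :=
  let cs := string.toList
  let n := cs.length
  let z := pvZ cs
  let ms := pvMatches z n
  let zb := ms.map (fun m => ((m.1 : Int) + 1, (m.2 : Int) + 1))
  if ms = [] then (List.replicate n none, zb, [], [])
  else
    let p0 := (ms.headD (0, 0)).1
    let zv := (List.range n).map
      (fun p => if p < p0 then none else some ((z.getD p 0 : Nat) : Int))
    let s := (List.range' p0 (n - p0) 1).foldl (pvStepB ms) (0, 0, 0, [], [])
    (zv, zb, s.2.2.2.1, s.2.2.2.2)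

-- ===== PRECONDITION & SPEC =====
def Spec_ZAlgo (string : String) (out : List (Option Int) × (List (Int × Int)) × List Int × List Int) : Prop := out = ZAlgo_alt string
instance (string : String) (out : List (Option Int) × (List (Int × Int)) × List Int × List Int) : Decidable (Spec_ZAlgo string out) := by unfold Spec_ZAlgo; infer_instance

-- ===== CLAIM (what is proved, stated in full; the proofs are below) =====
def Claim_equal_ZAlgo : Prop := ∀ (string : String), Dom_ZAlgo string → Spec_ZAlgo string (ZAlgo string)

-- ===== LEMMAS AND PROOFS =====

theorem pvExtend_ge (cs : List Char) (i zi : Nat) : zi ≤ pvExtend cs i zi := by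
  fun_induction pvExtend <;> omega

theorem pvExtend_le (cs : List Char) (i zi : Nat) (h : i + zi ≤ cs.length) :
    i + pvExtend cs i zi ≤ cs.length := by
  fun_induction pvExtend <;> omega

theorem pvExtend_matches (cs : List Char) (i zi : Nat)
    (h0 : ∀ j, j < zi → i + j < cs.length ∧ cs.getD j ' ' = cs.getD (i + j) ' ') :
    ∀ j, j < pvExtend cs i zi → i + j < cs.length ∧ cs.getD j ' ' = cs.getD (i + j) ' ' := by
  fun_induction pvExtend
  case case1 zi h ih =>
    apply ih
    intro j hj
    rcases Nat.lt_or_ge j zi with hlt | hge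
    · exact h0 j hlt
    · have : j = zi := by omega
      subst this; exact h
  case case2 zi h =>
    intro j hj; exact h0 j hj

theorem pvExtend_chain (cs : List Char) (i : Nat) :
    ∀ zi, (∀ j, j < zi → i + j < cs.length ∧ cs.getD j ' ' = cs.getD (i + j) ' ') →
    pvExtend cs i zi = pvExtend cs i 0 := by
  intro zi
  induction zi with
  | zero => intro _; rfl
  | succ z ih =>
    intro h
    have hc := h z (by omega)
    have hz : pvExtend cs i z = pvExtend cs i (z + 1) := by
      conv_lhs => rw [pvExtend]
      rw [dif_pos ⟨hc.1, hc.2⟩]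
    rw [← hz, ih (fun j hj => h j (by omega))]

theorem pvWhileA_eq (cs : List Char) (pos : Nat) :
    ∀ z, pvWhileA cs pos (pos + z) = pos + pvExtend cs pos z := by
  intro z
  fun_induction pvExtend cs pos z
  case case1 z h ih =>
    have hc : pos + z < cs.length ∧ cs.getD (pos + z) ' ' = cs.getD (pos + z - pos) ' ' := by
      refine ⟨h.1, ?_⟩
      rw [Nat.add_sub_cancel_left]
      exact h.2.symm
    have hunfA : pvWhileA cs pos (pos + z) = pvWhileA cs pos (pos + z + 1) := by
      conv_lhs => rw [pvWhileA]
      rw [dif_pos hc]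
    rw [hunfA]
    exact ih
  case case2 z h =>
    have hc : ¬(pos + z < cs.length ∧ cs.getD (pos + z) ' ' = cs.getD (pos + z - pos) ' ') := by
      intro hc
      exact h ⟨hc.1, by rw [Nat.add_sub_cancel_left] at hc; exact hc.2.symm⟩
    have hunfA : pvWhileA cs pos (pos + z) = pos + z := by
      conv_lhs => rw [pvWhileA]
      rw [dif_neg hc]
    exact hunfA

def ZInv (cs : List Char) (i : Nat) (s : List Nat × Nat × Nat) : Prop :=
  s.1.length = cs.length ∧
  (∀ j, 1 ≤ j → j < i → s.1.getD j 0 = pvExtend cs j 0) ∧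
  s.2.2 ≤ cs.length ∧
  (s.2.2 ≠ 0 → 1 ≤ s.2.1 ∧ s.2.1 < i ∧ s.2.2 = s.2.1 + pvExtend cs s.2.1 0)

theorem pvZStep_inv (cs : List Char) (i : Nat) (s : List Nat × Nat × Nat)
    (h1 : 1 ≤ i) (h2 : i < cs.length) (hI : ZInv cs i s) :
    ZInv cs (i + 1) (pvZStep cs s i) := by
  obtain ⟨hlen, hall, hrle, hr⟩ := hI
  obtain ⟨z, l, r⟩ := s
  simp only at hlen hall hrle hr
  simp only [pvZStep]
  set zi0 := if i < r then min (r - i) (z.getD (i - l) 0) else 0 with hzi0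
  have hmatch : ∀ j, j < zi0 → i + j < cs.length ∧ cs.getD j ' ' = cs.getD (i + j) ' ' := by
    intro j hj
    rw [hzi0] at hj
    by_cases hir : i < r
    · rw [if_pos hir] at hj
      obtain ⟨hl1, hli, hreq⟩ := hr (by omega)
      have hzil : z.getD (i - l) 0 = pvExtend cs (i - l) 0 := hall (i - l) (by omega) (by omega)
      rw [hzil] at hj
      have hj1 : j < r - i := lt_of_lt_of_le hj (min_le_left _ _)
      have hj2 : j < pvExtend cs (i - l) 0 := lt_of_lt_of_le hj (min_le_right _ _)
      have hm1 := pvExtend_matches cs (i - l) 0 (by omega) j hj2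
      have ht : (i - l) + j < pvExtend cs l 0 := by omega
      have hm2 := pvExtend_matches cs l 0 (by omega) ((i - l) + j) ht
      have hij : l + ((i - l) + j) = i + j := by omega
      rw [hij] at hm2
      exact ⟨by omega, by rw [hm1.2, ← hm2.2]⟩
    · rw [if_neg hir] at hj; omega
  have hchain : pvExtend cs i zi0 = pvExtend cs i 0 := pvExtend_chain cs i zi0 hmatch
  have hle : i + pvExtend cs i 0 ≤ cs.length := pvExtend_le cs i 0 (by omega)
  have hget : ∀ j, (z.set i (pvExtend cs i zi0)).getD j 0
      = if j = i then pvExtend cs i 0 else z.getD j 0 := by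
    intro j
    by_cases hji : j = i
    · subst hji
      simp [List.getD_eq_getElem?_getD, hlen ▸ h2, hchain]
    · rw [if_neg hji]
      simp [List.getD_eq_getElem?_getD, show ¬ i = j from fun h => hji h.symm]
  have hgall : ∀ j, 1 ≤ j → j < i + 1 →
      (z.set i (pvExtend cs i zi0)).getD j 0 = pvExtend cs j 0 := by
    intro j hj1 hj2
    rw [hget j]
    by_cases hji : j = i
    · subst hji; rw [if_pos rfl]
    · rw [if_neg hji]; exact hall j hj1 (by omega)
  have hslen : (z.set i (pvExtend cs i zi0)).length = cs.length := by
    simpa using hlen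
  clear hzi0
  clear_value zi0
  split_ifs with hcase
  · exact ⟨hslen, hgall, by dsimp only; omega, fun _ => ⟨h1, by dsimp only; omega, by dsimp only; omega⟩⟩
  · refine ⟨hslen, hgall, hrle, fun hne => ?_⟩
    obtain ⟨a, b, c⟩ := hr (by dsimp only at hne; exact hne)
    exact ⟨a, by dsimp only; omega, by dsimp only; exact c⟩

theorem pvZ_fold_inv (cs : List Char) :
    ∀ (m a : Nat) (s : List Nat × Nat × Nat), 1 ≤ a → a + m ≤ cs.length → ZInv cs a s →
    ZInv cs (a + m) ((List.range' a m 1).foldl (pvZStep cs) s) := by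
  intro m
  induction m with
  | zero => intro a s _ _ hI; simpa using hI
  | succ m ih =>
    intro a s ha hm hI
    rw [List.range'_succ, List.foldl_cons]
    have := ih (a + 1) (pvZStep cs s a) (by omega) (by omega)
      (pvZStep_inv cs a s ha (by omega) hI)
    have harith : a + 1 + m = a + (m + 1) := by omega
    rwa [harith] at this

theorem pvZ_correct (cs : List Char) (j : Nat) (h1 : 1 ≤ j) (h2 : j < cs.length) :
    (pvZ cs).getD j 0 = pvExtend cs j 0 := by
  have hI0 : ZInv cs 1 (List.replicate cs.length 0, 0, 0) := by
    refine ⟨by simp, by omega, by simp, by simp⟩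
  have h := pvZ_fold_inv cs (cs.length - 1) 1 _ (by omega) (by omega) hI0
  have harith : 1 + (cs.length - 1) = cs.length := by omega
  rw [harith] at h
  exact h.2.1 j h1 h2

-- z[a] ≠ 0 iff string[a] == string[0], and its value then
theorem pvZ_pos_iff (cs : List Char) (a : Nat) (h1 : 1 ≤ a) (h2 : a < cs.length) :
    (pvZ cs).getD a 0 ≠ 0 ↔ cs.getD a ' ' = cs.getD 0 ' ' := by
  rw [pvZ_correct cs a h1 h2]
  constructor
  · intro h
    by_contra hne
    apply h
    rw [pvExtend]
    rw [dif_neg]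
    intro hc
    exact hne (by simpa using hc.2.symm)
  · intro h
    have : pvExtend cs a 0 = pvExtend cs a 1 := by
      rw [pvExtend]
      rw [dif_pos ⟨by omega, by simpa using h.symm⟩]
    rw [this]
    have := pvExtend_ge cs a 1
    omega

theorem pvZ_val (cs : List Char) (a : Nat) (h1 : 1 ≤ a) (h2 : a < cs.length)
    (hm : cs.getD a ' ' = cs.getD 0 ' ') :
    (pvZ cs).getD a 0 = pvExtend cs a 1 := by
  rw [pvZ_correct cs a h1 h2]
  rw [pvExtend]
  rw [dif_pos ⟨by omega, by simpa using hm.symm⟩]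

-- small list helpers
theorem pv_getLastD_concat {α : Type} (l : List α) (x d : α) : (l ++ [x]).getLastD d = x := by
  rw [List.getLastD_eq_getLast?, List.getLast?_concat]
  rfl

theorem pv_headD_append {α : Type} (l t : List α) (d : α) (h : l ≠ []) :
    (l ++ t).headD d = l.headD d := by
  cases l with
  | nil => exact absurd rfl h
  | cons a l => simp

theorem pv_getD_append_left {α : Type} (l t : List α) (i : Nat) (d : α)
    (h : i < l.length) : (l ++ t).getD i d = l.getD i d := by
  simp [List.getD_eq_getElem?_getD, List.getElem?_append_left h]

theorem pv_getD_concat_length {α : Type} (l : List α) (x d : α) :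
    (l ++ [x]).getD l.length d = x := by
  simp [List.getD_eq_getElem?_getD]

theorem pv_getD_append_length {α : Type} (l t : List α) (d : α) :
    (l ++ t).getD l.length d = t.getD 0 d := by
  simp [List.getD_eq_getElem?_getD, List.getElem?_append_right (le_refl l.length)]

theorem pv_getD_zero_mem {α : Type} (t : List α) (d : α) (h : t ≠ []) : t.getD 0 d ∈ t := by
  cases t with
  | nil => exact absurd rfl h
  | cons a t => simp [List.getD]

-- every element of the match list records its own position
theorem pvMem_filterMap (z : List Nat) (r : List Nat) (x : Nat × Nat)
    (hx : x ∈ r.filterMap (fun p => if z.getD p 0 ≠ 0 then some (p, p + z.getD p 0 - 1) else none)) :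
    x.1 ∈ r ∧ z.getD x.1 0 ≠ 0 := by
  rw [List.mem_filterMap] at hx
  obtain ⟨p, hp, hfp⟩ := hx
  by_cases h : z.getD p 0 ≠ 0
  · rw [if_pos h] at hfp
    cases hfp
    exact ⟨hp, h⟩
  · rw [if_neg h] at hfp
    cases hfp

-- splitting the match list at position a
theorem pvMatches_succ (z : List Nat) (a : Nat) (h : 1 ≤ a) :
    pvMatches z (a + 1) = pvMatches z a ++
      ((if z.getD a 0 ≠ 0 then some (a, a + z.getD a 0 - 1) else none).toList) := by
  unfold pvMatches
  have h1 : a + 1 - 1 = (a - 1) + 1 := by omega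
  rw [h1, List.range'_concat]
  have h2 : 1 + 1 * (a - 1) = a := by omega
  rw [h2, List.filterMap_append]
  congr 1

theorem pvMatches_split (z : List Nat) (n a : Nat) (h1 : 1 ≤ a) (h2 : a ≤ n) :
    pvMatches z n = pvMatches z a ++
      (List.range' a (n - a) 1).filterMap
        (fun p => if z.getD p 0 ≠ 0 then some (p, p + z.getD p 0 - 1) else none) := by
  unfold pvMatches
  rw [← List.filterMap_append]
  congr 1
  have key : List.range' 1 (a - 1) 1 ++ List.range' (1 + 1 * (a - 1)) (n - a) 1
      = List.range' 1 ((a - 1) + (n - a)) 1 := List.range'_append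
  have h1a : 1 + 1 * (a - 1) = a := by omega
  rw [h1a] at key
  rw [key]
  congr 1
  omega

-- the simulation invariant between A's loop state and B's bookkeeping-loop state at position a
def pvInv (cs : List Char) (a : Nat) (st : PvSt) (s : Nat × Int × Int × List Int × List Int) : Prop :=
  pvMatches (pvZ cs) a ≠ [] ∧
  s.1 = (pvMatches (pvZ cs) a).length ∧
  st.zb = (pvMatches (pvZ cs) a).map (fun m => ((m.1 : Int) + 1, (m.2 : Int) + 1)) ∧
  st.lv = s.2.2.2.1 ∧ st.rv = s.2.2.2.2 ∧
  st.zv = (List.range cs.length).map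
    (fun j => if j < ((pvMatches (pvZ cs) a).headD (0, 0)).1 ∨ a ≤ j then none
              else some (((pvZ cs).getD j 0 : Nat) : Int)) ∧
  st.l = ((pvMatches (pvZ cs) a).getLastD (0, 0)).1 ∧
  st.r = ((pvMatches (pvZ cs) a).getLastD (0, 0)).2 ∧
  st.lv ≠ [] ∧ st.rv ≠ [] ∧
  s.2.1 = st.lv.getLastD 0 ∧ s.2.2.1 = st.rv.getLastD 0 ∧
  s.2.1 ≤ (st.l : Int) + 1 ∧ (s.2.1 < (st.l : Int) + 1 → (st.l : Int) + 1 < s.2.2.1) ∧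
  (st.r : Int) + 1 ≤ s.2.2.1 ∧
  1 ≤ st.l ∧ st.l ≤ st.r ∧ st.l < a ∧ ((pvMatches (pvZ cs) a).headD (0, 0)).1 < a

theorem pv_replicate_map (n : Nat) :
    (List.replicate n (none : Option Int)) = (List.range n).map (fun _ => none) := by
  rw [List.map_const', List.length_range]

theorem pv_map_range_set {α : Type} (n a : Nat) (g : Nat → α) (x : α) (_ha : a < n) :
    ((List.range n).map g).set a x
      = (List.range n).map (fun j => if j = a then x else g j) := by
  apply List.ext_getElem
  · simp
  · intro i h1 h2
    rw [List.getElem_set]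
    simp only [List.getElem_map, List.getElem_range]
    split_ifs with hia hia2 hia3 <;> first | rfl | omega

theorem pv_skip_step (cs : List Char) (a : Nat) (h1 : 1 ≤ a) (h2 : a < cs.length)
    (hz : (pvZ cs).getD a 0 = 0) : pvStepA cs (pvInit cs.length) a = pvInit cs.length := by
  have hne : ¬ (cs.getD a ' ' = cs.getD 0 ' ') := by
    intro h
    exact ((pvZ_pos_iff cs a h1 h2).mpr h) hz
  simp only [pvStepA, if_neg hne]
  rfl

theorem pv_first_step (cs : List Char) (a : Nat) (h1 : 1 ≤ a) (h2 : a < cs.length)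
    (hz : (pvZ cs).getD a 0 ≠ 0) (hMa : pvMatches (pvZ cs) a = []) :
    pvInv cs (a + 1) (pvStepA cs (pvInit cs.length) a)
      (pvStepB (pvMatches (pvZ cs) cs.length) (0, 0, 0, [], []) a) := by
  have hchar : cs.getD a ' ' = cs.getD 0 ' ' := (pvZ_pos_iff cs a h1 h2).mp hz
  have hzval : (pvZ cs).getD a 0 = pvExtend cs a 1 := pvZ_val cs a h1 h2 hchar
  have hk : pvWhileA cs a (a + 1) = a + pvExtend cs a 1 := pvWhileA_eq cs a 1
  have hge : 1 ≤ pvExtend cs a 1 := le_trans (by omega) (pvExtend_ge cs a 1)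
  have hM1 : pvMatches (pvZ cs) (a + 1) = [(a, a + pvExtend cs a 1 - 1)] := by
    rw [pvMatches_succ (pvZ cs) a h1, hMa, if_pos hz, hzval]
    rfl
  have hpre : pvMatches (pvZ cs) cs.length = pvMatches (pvZ cs) (a + 1) ++
      (List.range' (a+1) (cs.length - (a+1)) 1).filterMap
        (fun p => if (pvZ cs).getD p 0 ≠ 0 then some (p, p + (pvZ cs).getD p 0 - 1) else none) :=
    pvMatches_split (pvZ cs) cs.length (a+1) (by omega) (by omega)
  have hgd : (pvMatches (pvZ cs) cs.length).getD 0 (0,0) = (a, a + pvExtend cs a 1 - 1) := by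
    rw [hpre, hM1]
    rfl
  have hlen : 0 < (pvMatches (pvZ cs) cs.length).length := by
    rw [hpre, hM1]
    simp
  have hmax : max (0 : Int) (((a + pvExtend cs a 1 - 1 : Nat) : Int) + 1)
      = ((a + pvExtend cs a 1 - 1 : Nat) : Int) + 1 := max_eq_right (by omega)
  have hB : pvStepB (pvMatches (pvZ cs) cs.length) (0, 0, 0, [], []) a
      = (1, (a : Int) + 1, ((a + pvExtend cs a 1 - 1 : Nat) : Int) + 1,
         [(a : Int) + 1], [((a + pvExtend cs a 1 - 1 : Nat) : Int) + 1]) := by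
    simp only [pvStepB]
    rw [if_pos ⟨hlen, by rw [hgd]⟩, hgd, hmax]
    simp
  have hA : pvStepA cs (pvInit cs.length) a
      = ⟨(List.replicate cs.length (none : Option Int)).set a
            (some ((a + pvExtend cs a 1 - a : Nat) : Int)),
         [((a : Int) + 1, ((a + pvExtend cs a 1 - 1 : Nat) : Int) + 1)],
         [(a : Int) + 1], [((a + pvExtend cs a 1 - 1 : Nat) : Int) + 1],
         a, a + pvExtend cs a 1 - 1⟩ := by
    have hl0 : ¬ (a = 0) := by omega
    have hr0 : ¬ (a + pvExtend cs a 1 - 1 = 0) := by omega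
    have hchar' : cs[a]?.getD ' ' = cs[0]?.getD ' ' := by
      simpa only [List.getD_eq_getElem?_getD] using hchar
    simp [pvStepA, pvInit, hk, hchar', hl0, hr0]
  rw [hA, hB]
  have hsub : a + pvExtend cs a 1 - a = pvExtend cs a 1 := by omega
  refine ⟨by rw [hM1]; simp, by rw [hM1]; rfl, by rw [hM1]; rfl, rfl, rfl, ?_,
    by rw [hM1]; rfl, by rw [hM1]; rfl, by simp, by simp, by simp, by simp,
    by simp, by dsimp only; omega, by simp, by dsimp only; omega, by dsimp only; omega,
    by dsimp only; omega, by rw [hM1]; simp only [List.headD_cons]; omega⟩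
  · dsimp only
    rw [hM1]
    simp only [List.headD_cons]
    rw [pv_replicate_map, pv_map_range_set _ a _ _ h2]
    congr 1
    funext j
    rcases Nat.lt_trichotomy j a with hj | hj | hj
    · rw [if_neg (by omega), if_pos (Or.inl hj)]
    · subst hj
      rw [if_pos rfl, if_neg (by omega), hsub, hzval]
    · rw [if_neg (by omega), if_pos (Or.inr (by omega))]

theorem pv_nomatch_step (cs : List Char) (a : Nat) (st : PvSt)
    (s : Nat × Int × Int × List Int × List Int)
    (h1 : 1 ≤ a) (h2 : a < cs.length) (hz : (pvZ cs).getD a 0 = 0)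
    (hI : pvInv cs a st s) :
    pvInv cs (a + 1) (pvStepA cs st a) (pvStepB (pvMatches (pvZ cs) cs.length) s a) := by
  obtain ⟨zv0, zb0, lv0, rv0, l0, r0⟩ := st
  obtain ⟨mi, v, rm, lvs, rvs⟩ := s
  obtain ⟨hne0, hmi, hzb, hlv, hrv, hzv, hl, hr, hlvne, hrvne, hv, hrm, hvle, himp, hrmge,
    hl1, hlr, hla, hp0⟩ := hI
  simp only at hne0 hmi hzb hlv hrv hzv hl hr hlvne hrvne hv hrm hvle himp hrmge hl1 hlr hla hp0
  subst hlv hrv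
  have hchar : ¬ (cs.getD a ' ' = cs.getD 0 ' ') := fun h =>
    ((pvZ_pos_iff cs a h1 h2).mpr h) hz
  have hM1 : pvMatches (pvZ cs) (a + 1) = pvMatches (pvZ cs) a := by
    rw [pvMatches_succ (pvZ cs) a h1, if_neg (by exact fun hne => hne hz)]
    simp
  have hsplit : pvMatches (pvZ cs) cs.length = pvMatches (pvZ cs) a ++
      (List.range' a (cs.length - a) 1).filterMap
        (fun p => if (pvZ cs).getD p 0 ≠ 0 then some (p, p + (pvZ cs).getD p 0 - 1) else none) :=
    pvMatches_split (pvZ cs) cs.length a h1 (by omega)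
  have hcond : ¬ (mi < (pvMatches (pvZ cs) cs.length).length ∧
      ((pvMatches (pvZ cs) cs.length).getD mi (0, 0)).1 = a) := by
    rintro ⟨hlt, heq⟩
    set rest := (List.range' a (cs.length - a) 1).filterMap
        (fun p => if (pvZ cs).getD p 0 ≠ 0 then some (p, p + (pvZ cs).getD p 0 - 1) else none)
      with hrest
    have hrne : rest ≠ [] := by
      intro hemp
      rw [hsplit, hemp, List.append_nil, ← hmi] at hlt
      omega
    have hgd : (pvMatches (pvZ cs) cs.length).getD mi (0, 0) = rest.getD 0 (0, 0) := by
      rw [hsplit, hmi, pv_getD_append_length]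
    have hmem : (pvMatches (pvZ cs) cs.length).getD mi (0, 0) ∈ rest := by
      rw [hgd]
      exact pv_getD_zero_mem rest (0, 0) hrne
    have := pvMem_filterMap (pvZ cs) _ _ hmem
    rw [heq] at this
    exact this.2 hz
  have hB : pvStepB (pvMatches (pvZ cs) cs.length) (mi, v, rm, lv0, rv0) a
      = (mi, v, rm, lv0 ++ [v], rv0 ++ [rm]) := by
    simp only [pvStepB]
    rw [if_neg hcond]
  have happL : (if lv0 = [] ∨ (l0 : Int) + 1 ≤ lv0.getLastD 0 ∨ (l0 : Int) + 1 ≥ rv0.getLastD 0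
      then (l0 : Int) + 1 else lv0.getLastD 0) = v := by
    rw [← hv, ← hrm]
    rcases lt_or_eq_of_le hvle with hlt | heq
    · rw [if_neg]
      push_neg
      exact ⟨hlvne, by omega, himp hlt⟩
    · rw [if_pos (Or.inr (Or.inl (le_of_eq heq.symm)))]
      exact heq.symm
  have happR : (if rv0 = [] ∨ (r0 : Int) + 1 ≥ rv0.getLastD 0
      then (r0 : Int) + 1 else rv0.getLastD 0) = rm := by
    rw [← hrm]
    rcases lt_or_eq_of_le hrmge with hlt | heq
    · rw [if_neg]
      push_neg
      exact ⟨hrvne, hlt⟩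
    · rw [if_pos (Or.inr (le_of_eq heq.symm))]
      exact heq
  have hA : pvStepA cs ⟨zv0, zb0, lv0, rv0, l0, r0⟩ a
      = ⟨zv0.set a (some ((a - a : Nat) : Int)), zb0, lv0 ++ [v], rv0 ++ [rm], l0, r0⟩ := by
    simp only [pvStepA, if_neg hchar]
    rw [if_neg (by omega : ¬ (l0 = 0))]
    rw [happL]
    rw [if_neg (by omega : ¬ (r0 = 0))]
    rw [happR]
  rw [hA, hB]
  refine ⟨by rw [hM1]; exact hne0, by rw [hM1]; exact hmi, by rw [hM1]; exact hzb,
    rfl, rfl, ?_, by rw [hM1]; exact hl, by rw [hM1]; exact hr, by simp, by simp,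
    by simp, by simp, hvle, himp, hrmge,
    hl1, hlr, by dsimp only; omega, by rw [hM1]; omega⟩
  · dsimp only
    rw [hzv, pv_map_range_set _ a _ _ h2, hM1]
    congr 1
    funext j
    rcases Nat.lt_trichotomy j a with hj | hj | hj
    · rw [if_neg (by omega)]
      by_cases hjp : j < ((pvMatches (pvZ cs) a).headD (0, 0)).1
      · rw [if_pos (Or.inl hjp), if_pos (Or.inl hjp)]
      · rw [if_neg (by omega), if_neg (by omega)]
    · subst hj
      rw [if_pos rfl, if_neg (by omega), hz]
      simp
    · rw [if_neg (by omega), if_pos (Or.inr (by omega)), if_pos (Or.inr (by omega))]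

theorem pv_match_step (cs : List Char) (a : Nat) (st : PvSt)
    (s : Nat × Int × Int × List Int × List Int)
    (h1 : 1 ≤ a) (h2 : a < cs.length) (hz : (pvZ cs).getD a 0 ≠ 0)
    (hI : pvInv cs a st s) :
    pvInv cs (a + 1) (pvStepA cs st a) (pvStepB (pvMatches (pvZ cs) cs.length) s a) := by
  obtain ⟨zv0, zb0, lv0, rv0, l0, r0⟩ := st
  obtain ⟨mi, v, rm, lvs, rvs⟩ := s
  obtain ⟨hne0, hmi, hzb, hlv, hrv, hzv, hl, hr, hlvne, hrvne, hv, hrm, hvle, himp, hrmge,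
    hl1, hlr, hla, hp0⟩ := hI
  simp only at hne0 hmi hzb hlv hrv hzv hl hr hlvne hrvne hv hrm hvle himp hrmge hl1 hlr hla hp0
  subst hlv hrv
  have hchar : cs.getD a ' ' = cs.getD 0 ' ' := (pvZ_pos_iff cs a h1 h2).mp hz
  have hzval : (pvZ cs).getD a 0 = pvExtend cs a 1 := pvZ_val cs a h1 h2 hchar
  have hk : pvWhileA cs a (a + 1) = a + pvExtend cs a 1 := pvWhileA_eq cs a 1
  have hge : 1 ≤ pvExtend cs a 1 := le_trans (by omega) (pvExtend_ge cs a 1)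
  have hM1 : pvMatches (pvZ cs) (a + 1)
      = pvMatches (pvZ cs) a ++ [(a, a + pvExtend cs a 1 - 1)] := by
    rw [pvMatches_succ (pvZ cs) a h1, if_pos hz, hzval]
    rfl
  have hpre : pvMatches (pvZ cs) cs.length = pvMatches (pvZ cs) (a + 1) ++
      (List.range' (a+1) (cs.length - (a+1)) 1).filterMap
        (fun p => if (pvZ cs).getD p 0 ≠ 0 then some (p, p + (pvZ cs).getD p 0 - 1) else none) :=
    pvMatches_split (pvZ cs) cs.length (a+1) (by omega) (by omega)
  have hmiLt : mi < (pvMatches (pvZ cs) cs.length).length := by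
    rw [hpre, hM1]
    simp [hmi]
  have hgd : (pvMatches (pvZ cs) cs.length).getD mi (0, 0) = (a, a + pvExtend cs a 1 - 1) := by
    rw [hpre, pv_getD_append_left _ _ mi (0,0) (by rw [hM1]; simp [hmi]), hM1, hmi,
      pv_getD_concat_length]
  have hB : pvStepB (pvMatches (pvZ cs) cs.length) (mi, v, rm, lv0, rv0) a
      = (mi + 1,
         (if lv0 = [] ∨ (a : Int) + 1 ≥ rm then (a : Int) + 1 else v),
         max rm (((a + pvExtend cs a 1 - 1 : Nat) : Int) + 1),
         lv0 ++ [if lv0 = [] ∨ (a : Int) + 1 ≥ rm then (a : Int) + 1 else v],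
         rv0 ++ [max rm (((a + pvExtend cs a 1 - 1 : Nat) : Int) + 1)]) := by
    simp only [pvStepB]
    rw [if_pos ⟨hmiLt, by rw [hgd]⟩, hgd]
  have happL : (if lv0 = [] ∨ (a : Int) + 1 ≤ lv0.getLastD 0 ∨ (a : Int) + 1 ≥ rv0.getLastD 0
      then (a : Int) + 1 else lv0.getLastD 0)
      = (if lv0 = [] ∨ (a : Int) + 1 ≥ rm then (a : Int) + 1 else v) := by
    rw [← hv, ← hrm]
    by_cases hc : ((a : Nat) : Int) + 1 ≥ rm
    · rw [if_pos (Or.inr (Or.inr hc)), if_pos (Or.inr hc)]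
    · rw [if_neg, if_neg]
      · push_neg
        exact ⟨hlvne, by omega⟩
      · push_neg
        refine ⟨hlvne, by omega, by omega⟩
  have happR : (if rv0 = [] ∨ ((a + pvExtend cs a 1 - 1 : Nat) : Int) + 1 ≥ rv0.getLastD 0
      then ((a + pvExtend cs a 1 - 1 : Nat) : Int) + 1 else rv0.getLastD 0)
      = max rm (((a + pvExtend cs a 1 - 1 : Nat) : Int) + 1) := by
    rw [← hrm]
    by_cases hc : ((a + pvExtend cs a 1 - 1 : Nat) : Int) + 1 ≥ rm
    · rw [if_pos (Or.inr hc)]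
      exact (max_eq_right hc).symm
    · rw [if_neg]
      · exact (max_eq_left (by omega)).symm
      · push_neg
        exact ⟨hrvne, by omega⟩
  have hA : pvStepA cs ⟨zv0, zb0, lv0, rv0, l0, r0⟩ a
      = ⟨zv0.set a (some ((a + pvExtend cs a 1 - a : Nat) : Int)),
         zb0 ++ [((a : Int) + 1, ((a + pvExtend cs a 1 - 1 : Nat) : Int) + 1)],
         lv0 ++ [if lv0 = [] ∨ (a : Int) + 1 ≥ rm then (a : Int) + 1 else v],
         rv0 ++ [max rm (((a + pvExtend cs a 1 - 1 : Nat) : Int) + 1)],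
         a, a + pvExtend cs a 1 - 1⟩ := by
    simp only [pvStepA, if_pos hchar, hk]
    rw [if_neg (by omega : ¬ (a = 0))]
    rw [happL]
    rw [if_neg (by omega : ¬ (a + pvExtend cs a 1 - 1 = 0))]
    rw [happR]
  rw [hA, hB]
  have hhead : ((pvMatches (pvZ cs) (a+1)).headD (0,0)).1
      = ((pvMatches (pvZ cs) a).headD (0,0)).1 := by
    rw [hM1, pv_headD_append _ _ _ hne0]
  refine ⟨by rw [hM1]; simp, by rw [hM1]; simp [hmi], ?_, rfl, rfl, ?_,
    by rw [hM1, pv_getLastD_concat], by rw [hM1, pv_getLastD_concat], by simp, by simp,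
    by simp, by simp, ?_, ?_, ?_,
    by dsimp only; omega, by dsimp only; omega, by dsimp only; omega, by rw [hhead]; omega⟩
  · dsimp only
    rw [hM1, List.map_append, hzb]
    rfl
  · dsimp only
    rw [hzv, pv_map_range_set _ a _ _ h2, hhead]
    congr 1
    funext j
    rcases Nat.lt_trichotomy j a with hj | hj | hj
    · rw [if_neg (by omega)]
      by_cases hjp : j < ((pvMatches (pvZ cs) a).headD (0, 0)).1
      · rw [if_pos (Or.inl hjp), if_pos (Or.inl hjp)]
      · rw [if_neg (by omega), if_neg (by omega)]
    · subst hj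
      rw [if_pos rfl, if_neg (by omega), hzval]
      simp
    · rw [if_neg (by omega), if_pos (Or.inr (by omega)), if_pos (Or.inr (by omega))]
  · dsimp only
    split_ifs <;> omega
  · dsimp only
    have hmx := le_max_left rm (((a + pvExtend cs a 1 - 1 : Nat) : Int) + 1)
    split_ifs with hc
    · omega
    · rw [not_or] at hc
      intro _
      have : ¬ ((a : Int) + 1 ≥ rm) := hc.2
      omega
  · dsimp only
    exact le_max_right _ _

theorem pv_main (cs : List Char) (m : Nat) (hm : 1 + m ≤ cs.length) :
    (pvMatches (pvZ cs) (1 + m) = [] ∧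
      (List.range' 1 m 1).foldl (pvStepA cs) (pvInit cs.length) = pvInit cs.length) ∨
    pvInv cs (1 + m) ((List.range' 1 m 1).foldl (pvStepA cs) (pvInit cs.length))
      ((List.range' ((pvMatches (pvZ cs) (1 + m)).headD (0, 0)).1
          ((1 + m) - ((pvMatches (pvZ cs) (1 + m)).headD (0, 0)).1) 1).foldl
        (pvStepB (pvMatches (pvZ cs) cs.length)) (0, 0, 0, [], [])) := by
  induction m with
  | zero =>
    left
    exact ⟨rfl, rfl⟩
  | succ m ih =>
    have hm' : 1 + m ≤ cs.length := by omega
    have hrange : List.range' 1 (m + 1) 1 = List.range' 1 m 1 ++ [1 + m] := by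
      rw [List.range'_concat]
      congr 1
      simp
    rw [hrange, List.foldl_append, List.foldl_cons, List.foldl_nil]
    have h11 : 1 + (m + 1) = (1 + m) + 1 := by omega
    rcases ih hm' with ⟨hMe, hfold⟩ | hInv
    · by_cases hz : (pvZ cs).getD (1 + m) 0 = 0
      · left
        have hM1 : pvMatches (pvZ cs) (1 + m + 1) = [] := by
          rw [pvMatches_succ (pvZ cs) (1 + m) (by omega), hMe, if_neg (fun hne => hne hz)]
          rfl
        refine ⟨by rw [h11]; exact hM1, ?_⟩
        rw [hfold, pv_skip_step cs (1 + m) (by omega) (by omega) hz]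
      · right
        have hstep := pv_first_step cs (1 + m) (by omega) (by omega) hz hMe
        have hM1 : pvMatches (pvZ cs) (1 + m + 1)
            = [(1 + m, 1 + m + (pvZ cs).getD (1 + m) 0 - 1)] := by
          rw [pvMatches_succ (pvZ cs) (1 + m) (by omega), hMe, if_pos hz]
          rfl
        rw [h11, hM1]
        dsimp only [List.headD_cons]
        have hc : 1 + m + 1 - (1 + m) = 1 := by omega
        rw [hc, List.range'_one, List.foldl_cons, List.foldl_nil]
        rw [hfold]
        exact hstep
    · right
      have hcopy := hInv
      obtain ⟨hne0, -, -, -, -, -, -, -, -, -, -, -, -, -, -, -, -, -, hp0⟩ := hcopy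
      have hstep : pvInv cs ((1 + m) + 1)
          (pvStepA cs ((List.range' 1 m 1).foldl (pvStepA cs) (pvInit cs.length)) (1 + m))
          (pvStepB (pvMatches (pvZ cs) cs.length)
            ((List.range' ((pvMatches (pvZ cs) (1 + m)).headD (0, 0)).1
                ((1 + m) - ((pvMatches (pvZ cs) (1 + m)).headD (0, 0)).1) 1).foldl
              (pvStepB (pvMatches (pvZ cs) cs.length)) (0, 0, 0, [], [])) (1 + m)) := by
        by_cases hz : (pvZ cs).getD (1 + m) 0 = 0
        · exact pv_nomatch_step cs (1 + m) _ _ (by omega) (by omega) hz hInv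
        · exact pv_match_step cs (1 + m) _ _ (by omega) (by omega) hz hInv
      have hhead : ((pvMatches (pvZ cs) (1 + m + 1)).headD (0, 0)).1
          = ((pvMatches (pvZ cs) (1 + m)).headD (0, 0)).1 := by
        rw [pvMatches_succ (pvZ cs) (1 + m) (by omega)]
        exact congrArg Prod.fst (pv_headD_append _ _ _ hne0)
      rw [h11, hhead]
      have hsplit : List.range' ((pvMatches (pvZ cs) (1 + m)).headD (0, 0)).1
            ((1 + m) + 1 - ((pvMatches (pvZ cs) (1 + m)).headD (0, 0)).1) 1
          = List.range' ((pvMatches (pvZ cs) (1 + m)).headD (0, 0)).1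
              ((1 + m) - ((pvMatches (pvZ cs) (1 + m)).headD (0, 0)).1) 1 ++ [1 + m] := by
        have hcount : (1 + m) + 1 - ((pvMatches (pvZ cs) (1 + m)).headD (0, 0)).1
            = ((1 + m) - ((pvMatches (pvZ cs) (1 + m)).headD (0, 0)).1) + 1 := by omega
        have helem : ((pvMatches (pvZ cs) (1 + m)).headD (0, 0)).1
            + 1 * (1 + m - ((pvMatches (pvZ cs) (1 + m)).headD (0, 0)).1) = 1 + m := by omega
        rw [hcount, List.range'_concat, helem]
      rw [hsplit, List.foldl_append, List.foldl_cons, List.foldl_nil]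
      exact hstep

theorem ZAlgo_eq (string : String) : ZAlgo string = ZAlgo_alt string := by
  simp only [ZAlgo, ZAlgo_alt]
  by_cases hn : string.toList.length = 0
  · rw [hn]
    rfl
  · have h1 : 1 + (string.toList.length - 1) = string.toList.length := by omega
    by_cases hms : pvMatches (pvZ string.toList) string.toList.length = []
    · rw [if_pos hms]
      rcases pv_main string.toList (string.toList.length - 1) (by omega) with ⟨hMe, hfold⟩ | hInv
      · rw [hfold, hms]
        rfl
      · exfalso
        rw [h1] at hInv
        exact hInv.1 hms
    · rw [if_neg hms]
      rcases pv_main string.toList (string.toList.length - 1) (by omega) with ⟨hMe, _⟩ | hInv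
      · exfalso
        rw [h1] at hMe
        exact hms hMe
      · rw [h1] at hInv
        obtain ⟨hne0, hmi, hzb, hlv, hrv, hzv, -, -, -, -, -, -, -, -, -, -, -, -, hp0⟩ := hInv
        rw [hzv, hzb, hlv, hrv]
        refine Prod.ext ?_ rfl
        apply List.map_congr_left
        intro j hj
        rw [List.mem_range] at hj
        by_cases hjp : j < ((pvMatches (pvZ string.toList) string.toList.length).headD (0, 0)).1
        · rw [if_pos (Or.inl hjp), if_pos hjp]
        · rw [if_neg (by omega), if_neg hjp]

-- ===== VERDICT (by name: the statement is the Claim_ definition above) =====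
theorem ZAlgo_spec : Claim_equal_ZAlgo := by
  intro string _
  unfold Spec_ZAlgo
  exact ZAlgo_eq string
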